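-- pv_equiv track=rewrite | github.com/marcosfede/algorithms | googlecodejam/Saving The Universe Again/saving_the_universe_again.py | calculate_damage
-- ===== SOURCE A (Python) =====
-- def calculate_damage(p, d):
--     damage = 1
--     total = 0
--     for i in range(len(p)):
--         if p[i] == 'C':
--             damage *= 2
--         else:
--             total += damage
--     return total <= d
-- ===== SOURCE B (Python) =====
-- def calculate_damage(p, d):
--     return sum(2 ** p[:i].count('C') for i, ch in enumerate(p) if ch != 'C') <= d
-- ===== Notes on version B (the rewrite author's own statement) =====
-- stated objective: idiomatic
-- what changed: Replaces the running damage/total accumulator loop by a single sum comprehension where each non-'C' character contributes 2**(number of 'C's in the prefix before it), recounting the prefix per shot.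
import Mathlib
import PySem

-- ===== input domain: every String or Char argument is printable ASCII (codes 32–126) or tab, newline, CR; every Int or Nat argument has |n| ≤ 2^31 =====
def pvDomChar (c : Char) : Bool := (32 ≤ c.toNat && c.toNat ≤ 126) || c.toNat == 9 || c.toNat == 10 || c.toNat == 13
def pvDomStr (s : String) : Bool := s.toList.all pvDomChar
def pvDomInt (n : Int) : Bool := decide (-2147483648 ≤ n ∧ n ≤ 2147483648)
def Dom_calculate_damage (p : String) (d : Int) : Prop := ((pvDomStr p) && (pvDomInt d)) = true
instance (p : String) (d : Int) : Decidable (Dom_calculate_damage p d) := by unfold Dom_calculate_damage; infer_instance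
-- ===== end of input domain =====

-- ===== PORT A =====
-- literal port of A: fold over the characters with (damage, total) state
def calculate_damage (p : String) (d : Int) : Bool :=
  let st := p.toList.foldl
    (fun (s : Int × Int) c => if c = 'C' then (s.1 * 2, s.2) else (s.1, s.2 + s.1)) (1, 0)
  decide (st.2 ≤ d)

-- ===== PORT B =====
-- B recounts, for each non-'C' character, the 'C's in the prefix before it
def calculate_damage_alt (p : String) (d : Int) : Bool :=
  let l := p.toList
  decide ((((l.zipIdx).filter (fun ic => ic.1 ≠ 'C')).map
      (fun ic => (2 : Int) ^ ((l.take ic.2).count 'C'))).sum ≤ d)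

-- ===== PRECONDITION & SPEC =====
def Spec_calculate_damage (p : String) (d : Int) (out : Bool) : Prop := out = calculate_damage_alt p d
instance (p : String) (d : Int) (out : Bool) : Decidable (Spec_calculate_damage p d out) := by unfold Spec_calculate_damage; infer_instance

-- ===== CLAIM (what is proved, stated in full; the proofs are below) =====
def Claim_equal_calculate_damage : Prop := ∀ (p : String) (d : Int), Dom_calculate_damage p d → Spec_calculate_damage p d (calculate_damage p d)

-- ===== LEMMAS AND PROOFS =====

-- ===== VERDICT (by name: the statement is the Claim_ definition above) =====
-- damage contributed by the rest of the program, per unit of current damage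
def S : List Char → Int
  | [] => 0
  | c :: rest => if c = 'C' then 2 * S rest else 1 + S rest

theorem foldl_S (l : List Char) : ∀ dmg tot : Int,
    (l.foldl (fun (s : Int × Int) c => if c = 'C' then (s.1 * 2, s.2) else (s.1, s.2 + s.1))
      (dmg, tot)).2 = tot + dmg * S l := by
  induction l with
  | nil => intro dmg tot; simp [S]
  | cons c rest ih =>
    intro dmg tot
    by_cases h : c = 'C' <;> simp [S, h, List.foldl_cons, ih] <;> ring

theorem sum_S (l : List Char) : ∀ pre : List Char,
    (((l.zipIdx pre.length).filter (fun ic => ic.1 ≠ 'C')).map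
      (fun ic => (2 : Int) ^ (((pre ++ l).take ic.2).count 'C'))).sum
      = 2 ^ (pre.count 'C') * S l := by
  induction l with
  | nil => intro pre; simp [S]
  | cons c rest ih =>
    intro pre
    have hpre : (pre ++ c :: rest) = (pre ++ [c]) ++ rest := by simp
    have hlen : pre.length + 1 = (pre ++ [c]).length := by simp
    by_cases h : c = 'C'
    · subst h
      have := ih (pre ++ ['C'])
      rw [← hlen] at this; simp only [decide_not] at this
      simp only [List.zipIdx_cons, List.filter_cons, decide_not, hpre]
      simp only [decide_true, Bool.not_true, Bool.false_eq_true, if_false]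
      rw [this]
      have hc : (pre ++ ['C']).count 'C' = pre.count 'C' + 1 := by simp
      rw [hc]
      simp [S, pow_succ]
      ring
    · have := ih (pre ++ [c])
      rw [← hlen] at this; simp only [decide_not] at this
      simp only [List.zipIdx_cons, List.filter_cons, decide_not, hpre]
      have hne : (!decide ((c, pre.length).1 = 'C')) = true := by simp [h]
      simp only [hne, if_true, List.map_cons, List.sum_cons]
      rw [this]
      have h1 : (pre ++ [c]).count 'C' = pre.count 'C' := by simp [h]
      have h2 : ((pre ++ [c]) ++ rest).take pre.length = pre := by
        rw [List.take_append_of_le_length (by simp)]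
        rw [List.take_append_of_le_length (by simp)]
        simp
      rw [h1, h2]
      simp [S, h]
      ring

theorem ports_eq (p : String) (d : Int) :
    calculate_damage p d = calculate_damage_alt p d := by
  unfold calculate_damage calculate_damage_alt
  have hA := foldl_S p.toList 1 0
  have hB := sum_S p.toList []
  simp only [List.length_nil, List.nil_append, List.count_nil, pow_zero, one_mul] at hB
  simp only [hA, hB]
  simp

-- ===== VERDICT (by name: the statement is the Claim_ definition above) =====
theorem calculate_damage_spec : Claim_equal_calculate_damage := by
  intro p d _
  unfold Spec_calculate_damage
  exact ports_eq p d
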